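-- pv_equiv track=rewrite | github.com/s26mehta/DataStructures | Interview_Questions/not_easy_questions.py | find_most_nested_string
-- ===== SOURCE A (Python) =====
-- def find_most_nested_string(input, open_brackets = set(['[', '(', '{']), close_brackets = set([']', ')', '}'])):
--   if input == None or len(input) < 2:
--     return input
--   result = ()
--   depth = 0
--   idx = 0
--   while (idx < len(input)):
--     if input[idx] in open_brackets:
--       depth += 1
--     elif input[idx] in close_brackets:
--       depth -= 1
--     else:
--       cur_str = input[idx]
--
--       while (idx+1 < len(input) and input[idx+1] not in open_brackets and input[idx+1] not in close_brackets):
--         idx += 1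
--         cur_str += input[idx]
--
--       if result == () or result[1] < depth:
--         result = (cur_str, depth)
--     idx += 1
--   return result[0] if result != () else ""
-- ===== SOURCE B (Python) =====
-- def find_most_nested_string(input, open_brackets = set(['[', '(', '{']), close_brackets = set([']', ')', '}'])):
--   if input == None or len(input) < 2:
--     return input
--   segments = []
--   buf = ""
--   depth = 0
--   for ch in input:
--     if ch in open_brackets:
--       if buf:
--         segments.append((buf, depth))
--         buf = ""
--       depth += 1
--     elif ch in close_brackets:
--       if buf:
--         segments.append((buf, depth))
--         buf = ""
--       depth -= 1
--     else:
--       buf += ch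
--   if buf:
--     segments.append((buf, depth))
--   if not segments:
--     return ""
--   return max(segments, key=lambda t: t[1])[0]
-- ===== Notes on version B (the rewrite author's own statement) =====
-- stated objective: simpler
-- what changed: Replaced the index-based while loop with a nested run-consuming inner while and an in-loop first-strict-max update by a single char-by-char pass that buffers non-bracket runs into a (segment, depth) list and then selects max(segments, key=depth), relying on max's first-wins rule.
import Mathlib
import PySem

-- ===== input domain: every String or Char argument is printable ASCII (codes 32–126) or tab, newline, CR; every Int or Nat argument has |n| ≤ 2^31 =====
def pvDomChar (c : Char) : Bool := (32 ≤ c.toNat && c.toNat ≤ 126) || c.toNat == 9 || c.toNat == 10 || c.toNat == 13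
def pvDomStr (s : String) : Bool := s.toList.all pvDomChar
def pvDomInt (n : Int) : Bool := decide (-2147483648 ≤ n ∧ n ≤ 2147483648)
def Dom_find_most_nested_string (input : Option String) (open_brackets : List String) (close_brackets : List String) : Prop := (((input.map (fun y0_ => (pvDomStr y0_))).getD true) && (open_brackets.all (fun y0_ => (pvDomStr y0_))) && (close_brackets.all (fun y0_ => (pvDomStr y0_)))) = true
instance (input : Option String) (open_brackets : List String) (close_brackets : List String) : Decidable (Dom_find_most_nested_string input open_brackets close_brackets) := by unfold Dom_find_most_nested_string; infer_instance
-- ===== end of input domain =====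

-- B replaces A's index-based loop with nested run-consuming inner while (and in-loop first-strict-max update)
-- by one buffered char-by-char pass collecting (segment, depth) pairs followed by max(segments, key=depth); objective: simpler.

-- ===== PORT A =====
-- inner while of A: consume the non-bracket run starting after idx, appending to cur
-- (fuel = a totality guard only; the top-level call passes enough for the whole string)
def pvAInner (s : List Char) (ob cb : List String) : Nat → Nat → List Char → Nat × List Char
  | 0, idx, cur => (idx, cur)
  | fuel + 1, idx, cur =>
    if h : idx + 1 < s.length then
      if ob.contains (String.mk [s[idx+1]]) || cb.contains (String.mk [s[idx+1]]) then (idx, cur)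
      else pvAInner s ob cb fuel (idx + 1) (cur ++ [s[idx+1]])
    else (idx, cur)

-- A's 'if result == () or result[1] < depth: result = (cur_str, depth)'
def pvUpd (r : Option (List Char × Int)) (run : List Char) (d : Int) : Option (List Char × Int) :=
  match r with
  | none => some (run, d)
  | some t => if t.2 < d then some (run, d) else some t

def pvALoop (s : List Char) (ob cb : List String) :
    Nat → Nat → Int → Option (List Char × Int) → Option (List Char × Int)
  | 0, _, _, result => result
  | fuel + 1, idx, depth, result =>
    if h : idx < s.length then
      if ob.contains (String.mk [s[idx]]) then pvALoop s ob cb fuel (idx + 1) (depth + 1) result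
      else if cb.contains (String.mk [s[idx]]) then pvALoop s ob cb fuel (idx + 1) (depth - 1) result
      else
        let p := pvAInner s ob cb (fuel + 1) idx [s[idx]]
        pvALoop s ob cb fuel (p.1 + 1) depth (pvUpd result p.2 depth)
    else result

def find_most_nested_string (input : Option String) (open_brackets : List String) (close_brackets : List String) : Option String :=
  match input with
  | none => none
  | some s =>
    if s.toList.length < 2 then some s
    else
      match pvALoop s.toList open_brackets close_brackets s.toList.length 0 0 none with
      | none => some ""
      | some r => some (String.mk r.1)

-- ===== PORT B =====
-- one step of B's for-loop: flush the buffer on a bracket, else extend it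
def pvBStep (ob cb : List String) (st : List (List Char × Int) × List Char × Int) (c : Char) :
    List (List Char × Int) × List Char × Int :=
  if ob.contains (String.mk [c]) then
    (if st.2.1 ≠ [] then st.1 ++ [(st.2.1, st.2.2)] else st.1, [], st.2.2 + 1)
  else if cb.contains (String.mk [c]) then
    (if st.2.1 ≠ [] then st.1 ++ [(st.2.1, st.2.2)] else st.1, [], st.2.2 - 1)
  else (st.1, st.2.1 ++ [c], st.2.2)

def find_most_nested_string_alt (input : Option String) (open_brackets : List String) (close_brackets : List String) : Option String :=
  match input with
  | none => none
  | some s =>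
    if s.toList.length < 2 then some s
    else
      let st := s.toList.foldl (pvBStep open_brackets close_brackets) ([], [], 0)
      let segs := if st.2.1 ≠ [] then st.1 ++ [(st.2.1, st.2.2)] else st.1
      match PySem.List.max? segs (fun t => t.2) with
      | none => some ""
      | some m => some (String.mk m.1)

-- ===== PRECONDITION & SPEC =====
def Spec_find_most_nested_string (input : Option String) (open_brackets : List String) (close_brackets : List String) (out : Option String) : Prop := out = find_most_nested_string_alt input open_brackets close_brackets
instance (input : Option String) (open_brackets : List String) (close_brackets : List String) (out : Option String) : Decidable (Spec_find_most_nested_string input open_brackets close_brackets out) := by unfold Spec_find_most_nested_string; infer_instance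

-- ===== CLAIM (what is proved, stated in full; the proofs are below) =====
def Claim_equal_find_most_nested_string : Prop := ∀ (input : Option String) (open_brackets : List String) (close_brackets : List String), Dom_find_most_nested_string input open_brackets close_brackets → Spec_find_most_nested_string input open_brackets close_brackets (find_most_nested_string input open_brackets close_brackets)

-- ===== LEMMAS AND PROOFS =====

-- "not a bracket" predicate
def pvNB (ob cb : List String) (c : Char) : Bool :=
  !(ob.contains (String.mk [c]) || cb.contains (String.mk [c]))

-- structural (list-based) version of A's loop, at run granularity
def pvARun (ob cb : List String) : List Char → Int → Option (List Char × Int) → Option (List Char × Int)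
  | [], _, r => r
  | c :: cs, d, r =>
    if ob.contains (String.mk [c]) then pvARun ob cb cs (d + 1) r
    else if cb.contains (String.mk [c]) then pvARun ob cb cs (d - 1) r
    else
      pvARun ob cb (cs.dropWhile (pvNB ob cb)) d
        (pvUpd r (c :: cs.takeWhile (pvNB ob cb)) d)
termination_by l => l.length
decreasing_by
  all_goals simp only [List.length_cons]
  all_goals first
    | omega
    | exact Nat.lt_succ_of_le (List.Sublist.length_le (List.dropWhile_sublist _))

theorem pvARun_nil (ob cb : List String) (d : Int) (r : Option (List Char × Int)) :
    pvARun ob cb [] d r = r := by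
  rw [pvARun.eq_def]

theorem pvARun_cons (ob cb : List String) (c : Char) (cs : List Char) (d : Int)
    (r : Option (List Char × Int)) :
    pvARun ob cb (c :: cs) d r =
      (if ob.contains (String.mk [c]) then pvARun ob cb cs (d + 1) r
       else if cb.contains (String.mk [c]) then pvARun ob cb cs (d - 1) r
       else
         pvARun ob cb (cs.dropWhile (pvNB ob cb)) d
           (pvUpd r (c :: cs.takeWhile (pvNB ob cb)) d)) := by
  rw [pvARun.eq_def]

theorem pvDropLenTakeWhile {α : Type} (p : α → Bool) (l : List α) :
    l.drop (l.takeWhile p).length = l.dropWhile p := by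
  induction l with
  | nil => simp
  | cons a t ih =>
    by_cases h : p a = true
    · simp [List.takeWhile_cons, List.dropWhile_cons, h, ih]
    · simp [List.takeWhile_cons, List.dropWhile_cons, h]

theorem pvAInner_eq (s : List Char) (ob cb : List String) (fuel : Nat) :
    ∀ (idx : Nat) (cur : List Char), s.length ≤ fuel + idx + 1 →
    pvAInner s ob cb fuel idx cur =
      (idx + ((s.drop (idx + 1)).takeWhile (pvNB ob cb)).length,
       cur ++ (s.drop (idx + 1)).takeWhile (pvNB ob cb)) := by
  induction fuel with
  | zero =>
    intro idx cur hf
    have hd : s.drop (idx + 1) = [] := by apply List.drop_eq_nil_of_le; omega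
    simp [pvAInner, hd]
  | succ fuel ih =>
    intro idx cur hf
    rw [pvAInner]
    by_cases h : idx + 1 < s.length
    · have hd : s.drop (idx + 1) = s[idx+1] :: s.drop (idx + 2) := List.drop_eq_getElem_cons h
      rw [dif_pos h]
      by_cases hbr : (ob.contains (String.mk [s[idx+1]]) || cb.contains (String.mk [s[idx+1]])) = true
      · have hnb : pvNB ob cb s[idx+1] = false := by simp only [pvNB, hbr, Bool.not_true]
        rw [if_pos hbr, hd]
        simp [List.takeWhile_cons, hnb]
      · have hnb : pvNB ob cb s[idx+1] = true := by
          simp [pvNB] at hbr ⊢; exact hbr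
        rw [if_neg hbr, ih (idx + 1) (cur ++ [s[idx+1]]) (by omega), hd]
        simp only [List.takeWhile_cons, hnb, if_true, show idx + 1 + 1 = idx + 2 from rfl,
          List.length_cons, Prod.mk.injEq]
        constructor
        · omega
        · simp [List.append_assoc]
    · have hd : s.drop (idx + 1) = [] := by apply List.drop_eq_nil_of_le; omega
      rw [dif_neg h]
      simp [hd]

theorem pvALoop_eq_pvARun (s : List Char) (ob cb : List String) (fuel : Nat) :
    ∀ (idx : Nat) (d : Int) (r : Option (List Char × Int)), s.length ≤ fuel + idx →
    pvALoop s ob cb fuel idx d r = pvARun ob cb (s.drop idx) d r := by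
  induction fuel with
  | zero =>
    intro idx d r hf
    have hd : s.drop idx = [] := by apply List.drop_eq_nil_of_le; omega
    rw [hd, pvARun_nil, pvALoop]
  | succ fuel ih =>
    intro idx d r hf
    rw [pvALoop]
    by_cases h : idx < s.length
    · have hd : s.drop idx = s[idx] :: s.drop (idx + 1) := List.drop_eq_getElem_cons h
      rw [dif_pos h]
      by_cases ho : ob.contains (String.mk [s[idx]]) = true
      · rw [if_pos ho, ih (idx + 1) (d + 1) r (by omega), hd, pvARun_cons, if_pos ho]
      · by_cases hc : cb.contains (String.mk [s[idx]]) = true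
        · rw [if_neg ho, if_pos hc, ih (idx + 1) (d - 1) r (by omega), hd, pvARun_cons,
            if_neg ho, if_pos hc]
        · rw [if_neg ho, if_neg hc]
          have hp : pvAInner s ob cb (fuel + 1) idx [s[idx]]
              = (idx + ((s.drop (idx+1)).takeWhile (pvNB ob cb)).length,
                 [s[idx]] ++ (s.drop (idx+1)).takeWhile (pvNB ob cb)) :=
            pvAInner_eq s ob cb (fuel + 1) idx [s[idx]] (by omega)
          have hdd : s.drop (idx + ((s.drop (idx+1)).takeWhile (pvNB ob cb)).length + 1)
              = (s.drop (idx + 1)).dropWhile (pvNB ob cb) := by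
            rw [← pvDropLenTakeWhile (pvNB ob cb) (s.drop (idx+1)), List.drop_drop]
            congr 1
            omega
          have hlen : ((s.drop (idx+1)).takeWhile (pvNB ob cb)).length ≤ s.length - (idx + 1) := by
            have h1 := (List.takeWhile_sublist (l := s.drop (idx+1)) (p := pvNB ob cb)).length_le
            simp at h1
            omega
          rw [hp, ih (idx + ((s.drop (idx+1)).takeWhile (pvNB ob cb)).length + 1) d
            (pvUpd r ([s[idx]] ++ (s.drop (idx+1)).takeWhile (pvNB ob cb)) d) (by omega),
            hd, pvARun_cons, if_neg ho, if_neg hc]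
          simp only [List.singleton_append, hdd]
    · have hd : s.drop idx = [] := by apply List.drop_eq_nil_of_le; omega
      rw [dif_neg h, hd, pvARun_nil]

-- first-wins max over an appended segment = A's in-loop update
theorem pvMax_eq_foldlUpd (xs : List (List Char × Int)) :
    PySem.List.max? xs (fun t => t.2)
      = xs.foldl (fun acc x => pvUpd acc x.1 x.2) none := by
  unfold PySem.List.max?
  apply List.foldl_ext
  intro acc x _
  cases acc with
  | none => rfl
  | some m => cases x; rfl

theorem pvMax_append (segs : List (List Char × Int)) (run : List Char) (d : Int) :
    PySem.List.max? (segs ++ [(run, d)]) (fun t => t.2)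
      = pvUpd (PySem.List.max? segs (fun t => t.2)) run d := by
  rw [pvMax_eq_foldlUpd, pvMax_eq_foldlUpd, List.foldl_append, List.foldl_cons, List.foldl_nil]

theorem pvNB_split (ob cb : List String) (c : Char) (hc : pvNB ob cb c = true) :
    ob.contains (String.mk [c]) = false ∧ cb.contains (String.mk [c]) = false := by
  unfold pvNB at hc
  cases h1 : ob.contains (String.mk [c]) <;> cases h2 : cb.contains (String.mk [c]) <;>
    rw [h1, h2] at hc <;> simp_all

theorem pvB_run (ob cb : List String) (l : List Char) (hl : ∀ c ∈ l, pvNB ob cb c = true)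
    (segs : List (List Char × Int)) (buf : List Char) (d : Int) :
    l.foldl (pvBStep ob cb) (segs, buf, d) = (segs, buf ++ l, d) := by
  induction l generalizing buf with
  | nil => simp
  | cons c t ih =>
    have hc := pvNB_split ob cb c (hl c (by simp))
    rw [List.foldl_cons, pvBStep,
      if_neg (ne_of_eq_of_ne hc.1 Bool.false_ne_true),
      if_neg (ne_of_eq_of_ne hc.2 Bool.false_ne_true)]
    have := ih (fun x hx => hl x (by simp [hx])) (buf ++ [c])
    simpa [List.append_assoc] using this

theorem pvMain (ob cb : List String) (n : Nat) :
    ∀ l : List Char, l.length ≤ n → ∀ (segs : List (List Char × Int)) (d : Int),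
    pvARun ob cb l d (PySem.List.max? segs (fun t => t.2)) =
      (let st := l.foldl (pvBStep ob cb) (segs, [], d)
       PySem.List.max? (if st.2.1 ≠ [] then st.1 ++ [(st.2.1, st.2.2)] else st.1) (fun t => t.2)) := by
  induction n with
  | zero =>
    intro l hl segs d
    have : l = [] := List.eq_nil_of_length_eq_zero (by omega)
    subst this
    simp [pvARun_nil]
  | succ n ih =>
    intro l hl segs d
    match l with
    | [] => simp [pvARun_nil]
    | c :: cs =>
      by_cases ho : ob.contains (String.mk [c]) = true
      · rw [pvARun_cons, if_pos ho, List.foldl_cons, pvBStep, if_pos ho]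
        simp only [ne_eq, not_true_eq_false, if_false]
        exact ih cs (by simp at hl; omega) segs (d + 1)
      · by_cases hc : cb.contains (String.mk [c]) = true
        · rw [pvARun_cons, if_neg ho, if_pos hc, List.foldl_cons, pvBStep, if_neg ho, if_pos hc]
          simp only [ne_eq, not_true_eq_false, if_false]
          exact ih cs (by simp at hl; omega) segs (d - 1)
        · -- non-bracket: A consumes the whole run, B buffers it char by char
          rw [pvARun_cons, if_neg ho, if_neg hc, ← pvMax_append segs (c :: cs.takeWhile (pvNB ob cb)) d]
          have hsplit : cs = cs.takeWhile (pvNB ob cb) ++ cs.dropWhile (pvNB ob cb) :=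
            (List.takeWhile_append_dropWhile).symm
          have hstep1 : pvBStep ob cb (segs, [], d) c = (segs, [c], d) := by
            rw [pvBStep, if_neg ho, if_neg hc]
            rfl
          conv_rhs => rw [List.foldl_cons, hstep1, hsplit]
          rw [List.foldl_append,
            pvB_run ob cb (cs.takeWhile (pvNB ob cb)) (fun x hx => List.mem_takeWhile_imp hx) segs [c] d]
          match hrest : cs.dropWhile (pvNB ob cb) with
          | [] =>
            simp [pvARun_nil]
          | c' :: rest' =>
            have hc' : (ob.contains (String.mk [c']) || cb.contains (String.mk [c'])) = true := by
              have h0 := List.head?_dropWhile_not (pvNB ob cb) cs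
              rw [hrest] at h0
              simp only [List.head?_cons] at h0
              cases hx : (ob.contains (String.mk [c']) || cb.contains (String.mk [c'])) with
              | true => rfl
              | false =>
                have hnb : pvNB ob cb c' = true := by unfold pvNB; rw [hx]; rfl
                rw [hnb] at h0
                cases h0
            have hlen : rest'.length ≤ n := by
              have h1 := (List.dropWhile_sublist (l := cs) (p := pvNB ob cb)).length_le
              rw [hrest] at h1
              simp at hl h1
              omega
            rw [pvARun_cons]
            by_cases ho' : ob.contains (String.mk [c']) = true
            · rw [if_pos ho', List.foldl_cons, pvBStep, if_pos ho']
              simp only [ne_eq, List.cons_ne_nil, not_false_eq_true, if_true, List.singleton_append]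
              exact ih rest' hlen (segs ++ [(c :: cs.takeWhile (pvNB ob cb), d)]) (d + 1)
            · have hc2 : cb.contains (String.mk [c']) = true := by
                rcases Bool.or_eq_true_iff.mp hc' with h | h
                · exact absurd h ho'
                · exact h
              rw [if_neg ho', if_pos hc2, List.foldl_cons, pvBStep, if_neg ho', if_pos hc2]
              simp only [ne_eq, List.cons_ne_nil, not_false_eq_true, if_true, List.singleton_append]
              exact ih rest' hlen (segs ++ [(c :: cs.takeWhile (pvNB ob cb), d)]) (d - 1)

-- ===== VERDICT (by name: the statement is the Claim_ definition above) =====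
theorem find_most_nested_string_spec : Claim_equal_find_most_nested_string := by
  intro input ob cb _
  unfold Spec_find_most_nested_string find_most_nested_string find_most_nested_string_alt
  cases input with
  | none => rfl
  | some s =>
    dsimp only
    by_cases h : s.toList.length < 2
    · rw [if_pos h, if_pos h]
    · rw [if_neg h, if_neg h]
      have h1 : pvALoop s.toList ob cb s.toList.length 0 0 none = pvARun ob cb s.toList 0 none := by
        rw [pvALoop_eq_pvARun s.toList ob cb s.toList.length 0 0 none (by omega)]; simp
      have h2 := pvMain ob cb s.toList.length s.toList (le_refl _) [] 0
      have h0 : PySem.List.max? ([] : List (List Char × Int)) (fun t => t.2) = none := rfl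
      rw [h0] at h2
      rw [h1, h2]
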